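-- pv_equiv track=rewrite | github.com/YuexinXu/TCRAssembler | Script/test_assemble_IMGT_tcr.py | align_and_merge_cdr3_j
-- ===== SOURCE A (Python) =====
-- def align_and_merge_cdr3_j(v_cdr3_merged, j_seq, cdr3_nt_original):
--     """
--     Align CDR3 (at end of merged V+CDR3) with J sequence and merge.
--     CDR3 comes first, then J gene. Some head nucleotides of J will be replaced by CDR3.
--     Finds overlap between end of CDR3 and any position in J, preserves FULL CDR3,
--     then appends the remaining J sequence after the overlap.
--     Returns: (merged_sequence, overlap_length)
--
--     Args:
--         v_cdr3_merged: The merged V+CDR3 sequence (CDR3 is at the end, in uppercase)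
--         j_seq: The J gene sequence
--         cdr3_nt_original: The original CDR3 nucleotide sequence (for overlap detection)
--     """
--     v_cdr3_merged = v_cdr3_merged.upper()
--     j_seq = j_seq.upper()
--     cdr3_nt_original = cdr3_nt_original.upper()
--
--     # Find overlap between end of CDR3 and any position in J sequence
--     # We need to check if the end of CDR3 appears anywhere in J
--     cdr3_end_len = min(len(cdr3_nt_original), len(j_seq))
--     overlap_len = 0
--     overlap_pos_in_j = -1
--
--     # Try different overlap lengths, starting from maximum
--     for test_overlap in range(cdr3_end_len, 3 - 1, -1):
--         cdr3_end = cdr3_nt_original[-test_overlap:]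
--         # Check if this CDR3 end appears in J sequence
--         pos_in_j = j_seq.find(cdr3_end)
--         if pos_in_j != -1:
--             # Found overlap! The overlap starts at pos_in_j in J
--             overlap_len = test_overlap
--             overlap_pos_in_j = pos_in_j
--             break
--
--     if overlap_len > 0:
--         # Preserve FULL V+CDR3 merged sequence, then append J sequence starting after the overlap
--         # The overlapping part of J (from start to overlap_pos_in_j + overlap_len) is replaced by CDR3
--         remaining_j = j_seq[overlap_pos_in_j + overlap_len:].lower()
--         merged = v_cdr3_merged + remaining_j
--     else:
--         # No overlap found, append full J in lowercase
--         merged = v_cdr3_merged + j_seq.lower()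
--
--     return merged, overlap_len
-- ===== SOURCE B (Python) =====
-- def align_and_merge_cdr3_j(v_cdr3_merged, j_seq, cdr3_nt_original):
--     """Binary search the longest CDR3 suffix (length >= 3) occurring in J:
--     'suffix of length t occurs in J' is monotone in t, so bisection finds the
--     maximum with O(log) substring searches instead of a linear descent."""
--     v = v_cdr3_merged.upper()
--     j = j_seq.upper()
--     c = cdr3_nt_original.upper()
--     hi = min(len(c), len(j))
--     if hi < 3 or c[-3:] not in j:
--         return v + j.lower(), 0
--     lo = 3
--     while lo < hi:
--         mid = (lo + hi + 1) // 2
--         if c[-mid:] in j: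
--             lo = mid
--         else:
--             hi = mid - 1
--     pos = j.find(c[-lo:])
--     return v + j[pos + lo:].lower(), lo
-- ===== Notes on version B (the rewrite author's own statement) =====
-- stated objective: faster
-- what changed: A tries every candidate overlap length from max down to 3 with a substring search each; B exploits that 'the CDR3 suffix of length t occurs in J' is monotone in t and binary-searches the maximal t, doing O(log L) substring searches instead of O(L).
import Mathlib
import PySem

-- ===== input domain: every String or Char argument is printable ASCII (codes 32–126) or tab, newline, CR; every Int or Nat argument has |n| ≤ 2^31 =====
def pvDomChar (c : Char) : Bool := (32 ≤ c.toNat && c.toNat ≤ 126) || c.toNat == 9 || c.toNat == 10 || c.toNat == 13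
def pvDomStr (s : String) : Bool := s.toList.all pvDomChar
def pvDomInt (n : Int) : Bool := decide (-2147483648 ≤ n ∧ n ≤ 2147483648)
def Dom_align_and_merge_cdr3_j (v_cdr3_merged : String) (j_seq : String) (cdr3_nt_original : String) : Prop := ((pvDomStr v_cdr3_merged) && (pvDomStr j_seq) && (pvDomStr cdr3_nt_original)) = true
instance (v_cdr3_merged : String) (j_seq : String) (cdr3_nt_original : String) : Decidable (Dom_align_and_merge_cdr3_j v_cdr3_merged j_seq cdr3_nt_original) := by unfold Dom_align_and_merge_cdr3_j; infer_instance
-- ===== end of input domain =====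

-- B replaces A's linear descent over candidate overlap lengths by a binary search on the
-- monotone predicate "the CDR3 suffix of length t occurs in J" (objective: faster).

-- ===== PORT A =====
-- A's for-loop: test_overlap = cdr3_end_len, cdr3_end_len-1, …, 3; break at first hit.
def pvALoop (jU cU : List Char) (t : Nat) : Nat × Int :=
  if 3 ≤ t then
    let cdr3_end := PySem.List.slice cU (some (-(t : Int))) none
    let pos_in_j := PySem.Chars.find jU cdr3_end
    if pos_in_j ≠ -1 then (t, pos_in_j)
    else pvALoop jU cU (t - 1)
  else (0, -1)

def align_and_merge_cdr3_j (v_cdr3_merged : String) (j_seq : String) (cdr3_nt_original : String) : String × Int :=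
  let vU := PySem.Str.upper v_cdr3_merged
  let jU := PySem.Str.upper j_seq
  let cU := PySem.Str.upper cdr3_nt_original
  let cdr3_end_len := min cU.toList.length jU.toList.length
  let r := pvALoop jU.toList cU.toList cdr3_end_len
  if 0 < r.1 then
    let remaining_j := PySem.Str.lower (PySem.Str.slice jU (some (r.2 + (r.1 : Int))) none)
    (vU ++ remaining_j, (r.1 : Int))
  else
    (vU ++ PySem.Str.lower jU, 0)

-- ===== PORT B =====
-- B's while-loop: bisection on lo..hi, invariant "suffix of length lo occurs in J".
def pvBSearch (jU cU : List Char) (lo hi : Nat) : Nat :=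
  if lo < hi then
    let mid := (lo + hi + 1) / 2
    if PySem.Chars.isIn (PySem.List.slice cU (some (-(mid : Int))) none) jU then
      pvBSearch jU cU mid hi
    else
      pvBSearch jU cU lo (mid - 1)
  else lo
termination_by hi - lo
decreasing_by all_goals omega

def align_and_merge_cdr3_j_alt (v_cdr3_merged : String) (j_seq : String) (cdr3_nt_original : String) : String × Int :=
  let vU := PySem.Str.upper v_cdr3_merged
  let jU := PySem.Str.upper j_seq
  let cU := PySem.Str.upper cdr3_nt_original
  let hi := min cU.toList.length jU.toList.length
  if hi < 3 ∨ ¬ PySem.Chars.isIn (PySem.List.slice cU.toList (some (-3 : Int)) none) jU.toList then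
    (vU ++ PySem.Str.lower jU, 0)
  else
    let lo := pvBSearch jU.toList cU.toList 3 hi
    let pos := PySem.Chars.find jU.toList (PySem.List.slice cU.toList (some (-(lo : Int))) none)
    (vU ++ PySem.Str.lower (PySem.Str.slice jU (some (pos + (lo : Int))) none), (lo : Int))

-- ===== PRECONDITION & SPEC =====
def Spec_align_and_merge_cdr3_j (v_cdr3_merged : String) (j_seq : String) (cdr3_nt_original : String) (out : String × Int) : Prop := out = align_and_merge_cdr3_j_alt v_cdr3_merged j_seq cdr3_nt_original
instance (v_cdr3_merged : String) (j_seq : String) (cdr3_nt_original : String) (out : String × Int) : Decidable (Spec_align_and_merge_cdr3_j v_cdr3_merged j_seq cdr3_nt_original out) := by unfold Spec_align_and_merge_cdr3_j; infer_instance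

-- ===== CLAIM (what is proved, stated in full; the proofs are below) =====
def Claim_equal_align_and_merge_cdr3_j : Prop := ∀ (v_cdr3_merged : String) (j_seq : String) (cdr3_nt_original : String), Dom_align_and_merge_cdr3_j v_cdr3_merged j_seq cdr3_nt_original → Spec_align_and_merge_cdr3_j v_cdr3_merged j_seq cdr3_nt_original (align_and_merge_cdr3_j v_cdr3_merged j_seq cdr3_nt_original)

-- ===== LEMMAS AND PROOFS =====

-- the suffix of length t of c (Python c[-t:] for 0 < t)
def pvSfx (c : List Char) (t : Nat) : List Char := c.drop (c.length - t)

theorem pvSlice_eq_sfx (c : List Char) (t : Nat) (ht : 0 < t) :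
    PySem.List.slice c (some (-(t : Int))) none = pvSfx c t := by
  simpa [pvSfx] using PySem.List.slice_from_neg_natCast c t ht

-- monotonicity: a shorter suffix occurs wherever a longer one does
theorem pvSfx_mono {c j : List Char} {s t : Nat} (hst : s ≤ t) (htl : t ≤ c.length)
    (h : pvSfx c t <:+: j) : pvSfx c s <:+: j := by
  have hdrop : (pvSfx c t).drop (t - s) = pvSfx c s := by
    simp only [pvSfx, List.drop_drop]
    congr 1
    omega
  have hsuf : pvSfx c s <:+ pvSfx c t := hdrop ▸ List.drop_suffix (t - s) (pvSfx c t)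
  exact hsuf.isInfix.trans h

-- A's loop when no admissible overlap length works
theorem pvALoop_none (j c : List Char) :
    ∀ t, (∀ s, 3 ≤ s → s ≤ t → ¬ pvSfx c s <:+: j) → pvALoop j c t = (0, -1) := by
  intro t
  induction t using Nat.strong_induction_on with
  | _ t ih =>
    intro hnone
    rw [pvALoop]
    by_cases h3 : 3 ≤ t
    · have hfind : PySem.Chars.find j (pvSfx c t) = -1 := by
        rw [PySem.Chars.find_eq_neg_one_iff]
        exact hnone t h3 le_rfl
      simp only [pvSlice_eq_sfx c t (by omega : 0 < t), h3, if_true, hfind, ne_eq,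
        not_true_eq_false, if_false]
      exact ih (t - 1) (by omega) (fun s hs hst => hnone s hs (by omega))
    · simp [h3]

-- A's loop when m is the greatest admissible overlap length ≤ t that works
theorem pvALoop_found (j c : List Char) :
    ∀ t m, 3 ≤ m → m ≤ t → pvSfx c m <:+: j → (∀ s, m < s → s ≤ t → ¬ pvSfx c s <:+: j) →
      pvALoop j c t = (m, PySem.Chars.find j (pvSfx c m)) := by
  intro t
  induction t using Nat.strong_induction_on with
  | _ t ih =>
    intro m hm3 hmt hP hmax
    rw [pvALoop]
    have h3 : 3 ≤ t := le_trans hm3 hmt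
    rcases eq_or_lt_of_le hmt with heq | hlt
    · subst heq
      have hfind : PySem.Chars.find j (pvSfx c m) ≠ -1 := by
        rw [PySem.Chars.find_ne_neg_one_iff]
        exact hP
      simp [pvSlice_eq_sfx c m (by omega : 0 < m), h3, hfind]
    · have hfind : PySem.Chars.find j (pvSfx c t) = -1 := by
        rw [PySem.Chars.find_eq_neg_one_iff]
        exact hmax t hlt le_rfl
      simp only [pvSlice_eq_sfx c t (by omega : 0 < t), h3, if_true, hfind, ne_eq,
        not_true_eq_false, if_false]
      exact ih (t - 1) (by omega) m hm3 (by omega) hP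
        (fun s hs hst => hmax s hs (by omega))

theorem pvBSearch_base (j c : List Char) (lo : Nat) : pvBSearch j c lo lo = lo := by
  rw [pvBSearch]
  simp

-- B's binary search finds a working length whose successor fails (or the top)
theorem pvBSearch_spec (j c : List Char) :
    ∀ n lo hi, hi - lo ≤ n → 3 ≤ lo → lo ≤ hi → pvSfx c lo <:+: j →
      3 ≤ pvBSearch j c lo hi ∧ lo ≤ pvBSearch j c lo hi ∧ pvBSearch j c lo hi ≤ hi ∧
        pvSfx c (pvBSearch j c lo hi) <:+: j ∧
        (pvBSearch j c lo hi = hi ∨ ¬ pvSfx c (pvBSearch j c lo hi + 1) <:+: j) := by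
  intro n
  induction n with
  | zero =>
    intro lo hi hn h3 hle hP
    have heq : lo = hi := by omega
    subst heq
    rw [pvBSearch_base]
    exact ⟨h3, le_rfl, le_rfl, hP, Or.inl rfl⟩
  | succ n ih =>
    intro lo hi hn h3 hle hP
    by_cases hlt : lo < hi
    · rw [pvBSearch]
      simp only [hlt, if_true]
      set mid := (lo + hi + 1) / 2 with hmid
      have hmid1 : lo < mid := by omega
      have hmid2 : mid ≤ hi := by omega
      rw [pvSlice_eq_sfx c mid (by omega : 0 < mid)]
      by_cases hg : PySem.Chars.isIn (pvSfx c mid) j = true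
      · have hPmid : pvSfx c mid <:+: j := (PySem.Chars.isIn_iff_infix _ _).1 hg
        simp only [hg, if_true]
        obtain ⟨r3, rlo, rhi, rP, rtop⟩ := ih mid hi (by omega) (by omega) hmid2 hPmid
        exact ⟨r3, by omega, rhi, rP, rtop⟩
      · have hNmid : ¬ pvSfx c mid <:+: j := fun h =>
          hg ((PySem.Chars.isIn_iff_infix _ _).2 h)
        rw [Bool.not_eq_true] at hg
        simp only [hg, Bool.false_eq_true, if_false]
        obtain ⟨r3, rlo, rhi, rP, rtop⟩ := ih lo (mid - 1) (by omega) h3 (by omega) hP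
        refine ⟨r3, rlo, by omega, rP, Or.inr ?_⟩
        rcases rtop with htop | hnot
        · rw [htop, show mid - 1 + 1 = mid by omega]
          exact hNmid
        · exact hnot
    · have heq : lo = hi := by omega
      subst heq
      rw [pvBSearch_base]
      exact ⟨h3, le_rfl, le_rfl, hP, Or.inl rfl⟩

-- ===== VERDICT (by name: the statement is the Claim_ definition above) =====
theorem align_and_merge_cdr3_j_spec : Claim_equal_align_and_merge_cdr3_j := by
  intro v j0 c0 _
  unfold Spec_align_and_merge_cdr3_j align_and_merge_cdr3_j align_and_merge_cdr3_j_alt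
  simp only []
  set jU := PySem.Str.upper j0 with hjU
  set cU := PySem.Str.upper c0 with hcU
  set H := min cU.toList.length jU.toList.length with hH
  have hHc : H ≤ cU.toList.length := Nat.min_le_left _ _
  have hsl3 : PySem.List.slice cU.toList (some (-3 : Int)) none = pvSfx cU.toList 3 := by
    have h := pvSlice_eq_sfx cU.toList 3 (by omega)
    rwa [show (-(((3:Nat)) : Int)) = (-3 : Int) by norm_num] at h
  by_cases hH3 : H < 3
  · -- loop never runs; B takes its no-overlap branch via the first disjunct
    have hA : pvALoop jU.toList cU.toList H = (0, -1) := by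
      rw [pvALoop]
      simp [show ¬ 3 ≤ H by omega]
    rw [hA, if_neg (by norm_num), if_pos (Or.inl hH3)]
  · by_cases hP3 : pvSfx cU.toList 3 <:+: jU.toList
    · -- overlap exists: both sides find the greatest working length
      obtain ⟨hm3, _, hmH, hPm, htop⟩ :=
        pvBSearch_spec jU.toList cU.toList (H - 3) 3 H le_rfl le_rfl (by omega) hP3
      set m := pvBSearch jU.toList cU.toList 3 H with hmdef
      have hmax : ∀ s, m < s → s ≤ H → ¬ pvSfx cU.toList s <:+: jU.toList := by
        intro s hms hsH hPs
        rcases htop with htop | hnot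
        · omega
        · exact hnot (pvSfx_mono (by omega) (by omega) hPs)
      have hA := pvALoop_found jU.toList cU.toList H m hm3 hmH hPm hmax
      rw [hA, if_pos (show 0 < (m, PySem.Chars.find jU.toList (pvSfx cU.toList m)).1 by omega),
        if_neg (by
          push Not
          refine ⟨by omega, ?_⟩
          rw [hsl3, PySem.Chars.isIn_iff_infix]
          exact hP3)]
      rw [pvSlice_eq_sfx cU.toList m (by omega : 0 < m)]
    · -- no overlap at all: both sides append the full J in lowercase
      have hnone : ∀ s, 3 ≤ s → s ≤ H → ¬ pvSfx cU.toList s <:+: jU.toList := by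
        intro s hs3 hsH hPs
        exact hP3 (pvSfx_mono hs3 (by omega) hPs)
      rw [pvALoop_none jU.toList cU.toList H hnone, if_neg (by norm_num),
        if_pos (Or.inr (by rw [hsl3, PySem.Chars.isIn_iff_infix]; exact hP3))]
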